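-- pv_equiv track=rewrite | github.com/paiml/depyler | examples/hard_count_derangements.py | partial_derangements
-- ===== SOURCE A (Python) =====
-- def count_derangements(n: int) -> int:
--     """Return number of derangements of n elements. D(n) = (n-1)*(D(n-1) + D(n-2))."""
--     if n == 0:
--         return 1
--     if n == 1:
--         return 0
--     dp: list[int] = []
--     i: int = 0
--     while i <= n:
--         dp.append(0)
--         i = i + 1
--     dp[0] = 1
--     dp[1] = 0
--     i = 2
--     while i <= n:
--         dp[i] = (i - 1) * (dp[i - 1] + dp[i - 2])
--         i = i + 1
--     return dp[n]
--
-- def partial_derangements(n: int, k: int) -> int: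
--     """Return number of permutations of n with exactly k fixed points.
--
--     Formula: C(n, k) * D(n - k)
--     """
--     if k > n:
--         return 0
--     c: int = 1
--     i: int = 0
--     while i < k:
--         c = c * (n - i) // (i + 1)
--         i = i + 1
--     d: int = count_derangements(n - k)
--     return c * d
-- ===== SOURCE B (Python) =====
-- def partial_derangements(n: int, k: int) -> int:
--     """Number of permutations of n with exactly k fixed points: C(n,k) * D(n-k)."""
--     if k > n:
--         return 0
--     num = 1
--     den = 1
--     for i in range(k):
--         num *= n - i
--         den *= i + 1
--     c = num // den
--     d = 1
--     for j in range(1, n - k + 1):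
--         d = d * j + (-1) ** j
--     return c * d
-- ===== Notes on version B (the rewrite author's own statement) =====
-- stated objective: simpler
-- what changed: The O(m)-memory array-based two-term derangement DP is replaced by the single-accumulator inclusion-exclusion recurrence D(j)=j*D(j-1)+(-1)^j, and the binomial's per-step exact floor divisions are replaced by one final division of a numerator and denominator product.
import Mathlib
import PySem

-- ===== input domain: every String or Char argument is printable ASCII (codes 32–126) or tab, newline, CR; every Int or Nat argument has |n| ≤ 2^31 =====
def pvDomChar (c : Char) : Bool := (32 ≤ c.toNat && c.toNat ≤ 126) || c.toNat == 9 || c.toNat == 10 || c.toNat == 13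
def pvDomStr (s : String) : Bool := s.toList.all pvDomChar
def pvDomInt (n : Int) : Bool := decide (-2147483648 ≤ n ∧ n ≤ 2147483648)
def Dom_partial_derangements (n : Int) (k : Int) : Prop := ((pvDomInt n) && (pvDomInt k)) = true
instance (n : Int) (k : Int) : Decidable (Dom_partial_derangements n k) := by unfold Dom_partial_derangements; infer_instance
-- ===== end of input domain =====

-- B replaces A's array-based two-term derangement DP by the single-accumulator recurrence
-- D(j) = j*D(j-1) + (-1)^j and A's per-step exact floor divisions by one final division (simpler, O(1) space).

-- ===== PORT A =====
-- while i <= n: dp[i] = (i-1)*(dp[i-1]+dp[i-2]); i += 1 — i starts at 2 and stays ≥ 2, so a Nat index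
-- with a Nat step count (n-1).toNat is exact; dp[j] reads/writes are always in range in Python here.
def pvCdLoop (dp : List Int) (i : Nat) : Nat → List Int
  | 0 => dp
  | s + 1 =>
      pvCdLoop (dp.set i (((i : Int) - 1) * (dp.getD (i - 1) 0 + dp.getD (i - 2) 0))) (i + 1) s

def count_derangements (n : Int) : Int :=
  if n = 0 then 1
  else if n = 1 then 0
  else
    -- while i <= n: dp.append(0): n+1 zero appends (A only reaches this branch with n ≥ 2)
    let dp : List Int := (List.range (n + 1).toNat).foldl (fun l _ => l ++ [(0 : Int)]) []
    let dp := dp.set 0 1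
    let dp := dp.set 1 0
    let dp := pvCdLoop dp 2 (n - 1).toNat
    dp.getD n.toNat 0

def partial_derangements (n : Int) (k : Int) : Int :=
  if k > n then 0
  else
    let c : Int := (PySem.List.pyRange 0 k).foldl
      (fun c i => PySem.Int.floordiv (c * (n - i)) (i + 1)) 1
    let d : Int := count_derangements (n - k)
    c * d

-- ===== PORT B =====
def partial_derangements_alt (n : Int) (k : Int) : Int :=
  if k > n then 0
  else
    let p : Int × Int := (PySem.List.pyRange 0 k).foldl
      (fun (p : Int × Int) i => (p.1 * (n - i), p.2 * (i + 1))) (1, 1)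
    let c : Int := PySem.Int.floordiv p.1 p.2
    let d : Int := (PySem.List.pyRange 1 (n - k + 1)).foldl
      (fun d j => d * j + (-1) ^ j.toNat) 1
    c * d

-- ===== PRECONDITION & SPEC =====
def Spec_partial_derangements (n : Int) (k : Int) (out : Int) : Prop := out = partial_derangements_alt n k
instance (n : Int) (k : Int) (out : Int) : Decidable (Spec_partial_derangements n k out) := by unfold Spec_partial_derangements; infer_instance

-- ===== CLAIM (what is proved, stated in full; the proofs are below) =====
def Claim_equal_partial_derangements : Prop := ∀ (n : Int) (k : Int), Dom_partial_derangements n k → Spec_partial_derangements n k (partial_derangements n k)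

-- ===== LEMMAS AND PROOFS =====

-- Reference derangement numbers by A's two-term recurrence.
def pvDm : Nat → Int
  | 0 => 1
  | 1 => 0
  | m + 2 => ((m : Int) + 1) * (pvDm (m + 1) + pvDm m)

theorem pvDm_succ (m : Nat) : pvDm (m + 1) = ((m : Int) + 1) * pvDm m + (-1) ^ (m + 1) := by
  induction m with
  | zero => simp [pvDm]
  | succ p ih =>
      show ((p : Int) + 1) * (pvDm (p + 1) + pvDm p) = _
      push_cast
      linear_combination (-1 : Int) * ih

-- B's derangement loop computes pvDm.
theorem pvAltD_eq (m : Nat) :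
    (PySem.List.pyRange 1 ((m : Int) + 1)).foldl (fun d j => d * j + (-1) ^ j.toNat) 1 = pvDm m := by
  induction m with
  | zero => decide
  | succ p ih =>
      rw [show (((p + 1 : Nat) : Int) + 1) = ((p : Int) + 1) + 1 by push_cast; ring,
        PySem.List.pyRange_one_succ_right (by omega), List.foldl_append, ih]
      have ht : ((p : Int) + 1).toNat = p + 1 := by omega
      simp only [List.foldl, ht, pvDm_succ p]
      ring

-- zero-append loop builds a replicate
theorem pvZeros_eq (t : Nat) :
    (List.range t).foldl (fun l _ => l ++ [(0 : Int)]) [] = List.replicate t 0 := by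
  induction t with
  | zero => rfl
  | succ p ih => rw [List.range_succ, List.foldl_append, ih, List.replicate_succ']; rfl

-- A's in-place DP loop leaves pvDm at every filled position.
theorem pvCdLoop_getD (s : Nat) : ∀ (i : Nat) (dp : List Int), 2 ≤ i → i + s ≤ dp.length →
    (∀ j, j < i → dp.getD j 0 = pvDm j) →
    ∀ j, j < i + s → (pvCdLoop dp i s).getD j 0 = pvDm j := by
  induction s with
  | zero => intro i dp _ _ h j hj; simpa [pvCdLoop] using h j (by omega)
  | succ p ih =>
      intro i dp hi hlen h j hj
      obtain ⟨q, rfl⟩ : ∃ q, i = q + 2 := ⟨i - 2, by omega⟩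
      have hv : dp.getD (q + 2 - 1) 0 + dp.getD (q + 2 - 2) 0 = pvDm (q + 1) + pvDm q := by
        rw [h (q + 2 - 1) (by omega), h (q + 2 - 2) (by omega)]
        rfl
      show (pvCdLoop (dp.set (q + 2) _) (q + 3) p).getD j 0 = pvDm j
      apply ih (q + 3) _ (by omega) (by simp; omega) _ j (by omega)
      intro j' hj'
      rw [List.getD_eq_getElem?_getD]
      rcases Nat.lt_or_ge j' (q + 2) with hlt | hge
      · rw [List.getElem?_set_ne (by omega)]
        rw [← List.getD_eq_getElem?_getD]
        exact h j' hlt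
      · have : j' = q + 2 := by omega
        subst this
        rw [List.getElem?_set_self (by omega)]
        simp only [Option.getD_some, hv]
        show ((q : Int) + 2 - 1) * (pvDm (q + 1) + pvDm q) = pvDm (q + 2)
        show _ = ((q : Int) + 1) * (pvDm (q + 1) + pvDm q)
        ring

theorem pvCountD_eq (x : Int) (hx : 0 ≤ x) : count_derangements x = pvDm x.toNat := by
  rcases eq_or_ne x 0 with rfl | h0
  · decide
  rcases eq_or_ne x 1 with rfl | h1
  · decide
  have hx2 : 2 ≤ x := by omega
  have hm : x.toNat = (x.toNat - 2) + 2 := by omega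
  unfold count_derangements
  rw [if_neg h0, if_neg h1, pvZeros_eq]
  have hlen : (((List.replicate (x + 1).toNat (0 : Int)).set 0 1).set 1 0).length = x.toNat + 1 := by
    simp; omega
  rw [pvCdLoop_getD (x - 1).toNat 2 _ (by omega) (by rw [hlen]; omega) _ x.toNat (by omega)]
  intro j hj
  interval_cases j
  · rw [List.getD_eq_getElem?_getD, List.getElem?_set_ne (by omega),
      List.getElem?_set_self (by simp; omega)]
    rfl
  · rw [List.getD_eq_getElem?_getD, List.getElem?_set_self (by simp; omega)]
    rfl

-- pyRange 0 k is empty for k ≤ 0.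
theorem pvRange_nil (k : Int) (hk : k ≤ 0) : PySem.List.pyRange 0 k = [] := by
  rw [List.eq_nil_iff_forall_not_mem]
  intro x hx
  have := PySem.List.mem_pyRange_one.1 hx
  omega

-- Binomial invariants: A's running exact-division fold and B's product pair, over range K.
theorem pvBinomA_inv (n : Int) (N : Nat) (hN : n = (N : Int)) (K : Nat) (hK : K ≤ N) :
    (PySem.List.pyRange 0 (K : Int)).foldl
      (fun c i => PySem.Int.floordiv (c * (n - i)) (i + 1)) 1 = (N.choose K : Int) := by
  induction K with
  | zero => rw [Nat.cast_zero, pvRange_nil 0 (by omega)]; simp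
  | succ t ih =>
      rw [show ((t + 1 : Nat) : Int) = (t : Int) + 1 by push_cast; ring,
        PySem.List.pyRange_one_succ_right (by omega), List.foldl_append, ih (by omega)]
      have hnt : n - (t : Int) = ((N - t : Nat) : Int) := by omega
      simp only [List.foldl_cons, List.foldl_nil, hnt]
      rw [show ((N.choose t : Int) * ((N - t : Nat) : Int)) = ((N.choose t * (N - t) : Nat) : Int) by
          push_cast; ring,
        show ((t : Int) + 1) = ((t + 1 : Nat) : Int) by push_cast; ring,
        PySem.Int.floordiv_natCast, ← Nat.choose_succ_right_eq,
        Nat.mul_div_cancel _ (by omega)]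

theorem pvBinomB_inv (n : Int) (N : Nat) (hN : n = (N : Int)) (K : Nat) (hK : K ≤ N) :
    (PySem.List.pyRange 0 (K : Int)).foldl
      (fun (p : Int × Int) i => (p.1 * (n - i), p.2 * (i + 1))) (1, 1) =
      ((N.descFactorial K : Int), (K.factorial : Int)) := by
  induction K with
  | zero => rw [Nat.cast_zero, pvRange_nil 0 (by omega)]; simp
  | succ t ih =>
      rw [show ((t + 1 : Nat) : Int) = (t : Int) + 1 by push_cast; ring,
        PySem.List.pyRange_one_succ_right (by omega), List.foldl_append, ih (by omega)]
      have hnt : n - (t : Int) = ((N - t : Nat) : Int) := by omega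
      simp only [List.foldl_cons, List.foldl_nil, hnt, Nat.descFactorial_succ, Nat.factorial_succ]
      rw [Prod.mk.injEq]
      constructor <;> (push_cast; ring)

-- ===== VERDICT (by name: the statement is the Claim_ definition above) =====
theorem partial_derangements_spec : Claim_equal_partial_derangements := by
  intro n k _
  unfold Spec_partial_derangements partial_derangements partial_derangements_alt
  by_cases hkn : k > n
  · rw [if_pos hkn, if_pos hkn]
  rw [if_neg hkn, if_neg hkn]
  have hk : k ≤ n := not_lt.1 hkn
  have hd : count_derangements (n - k) =
      (PySem.List.pyRange 1 (n - k + 1)).foldl (fun d j => d * j + (-1) ^ j.toNat) 1 := by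
    have h0 : (0 : Int) ≤ n - k := by omega
    rw [pvCountD_eq _ h0, show n - k + 1 = (((n - k).toNat : Int) + 1) by omega, pvAltD_eq]
  rcases (by omega : k ≤ 0 ∨ 0 < k) with hk0 | hk0
  · rw [pvRange_nil k hk0]
    simp [hd]
  · have hN : n = (n.toNat : Int) := by omega
    have hkc : k = ((k.toNat : Nat) : Int) := by omega
    have e1 : (PySem.List.pyRange 0 k).foldl
        (fun c i => PySem.Int.floordiv (c * (n - i)) (i + 1)) 1 = (n.toNat.choose k.toNat : Int) := by
      rw [hkc]; exact pvBinomA_inv n n.toNat hN k.toNat (by omega)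
    have e2 : (PySem.List.pyRange 0 k).foldl
        (fun (p : Int × Int) i => (p.1 * (n - i), p.2 * (i + 1))) (1, 1) =
        ((n.toNat.descFactorial k.toNat : Int), (k.toNat.factorial : Int)) := by
      rw [hkc]; exact pvBinomB_inv n n.toNat hN k.toNat (by omega)
    rw [hd, e1, e2]
    show (n.toNat.choose k.toNat : Int) * _ =
      PySem.Int.floordiv (n.toNat.descFactorial k.toNat : Int) (k.toNat.factorial : Int) * _
    rw [PySem.Int.floordiv_natCast, ← Nat.choose_eq_descFactorial_div_factorial]
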